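-- pv_equiv track=rewrite | github.com/Tyro-Fang/-Offer | 44.py | IsSeries
-- ===== SOURCE A (Python) =====
-- def IsSeries(nums):
--     result=QuickSort(nums)
--     queue=0
--     lastVal=0
--     diff=0
--     for i in result:
--         if i==0:
--             queue+=1
--         elif lastVal==0:
--             lastVal=i
--         else:
--             diff+=(i-lastVal-1)
--             lastVal=i
--     if diff<=queue:
--         return True
--     return False
--
-- def QuickSort(nums):
--     if nums==None or len(nums)<2:
--         return nums
--     QuickSortsort(nums,0,len(nums)-1)
--     return nums
--
-- def QuickSortPartition(nums,beginIndex,endIndex):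
--     val=nums[beginIndex]
--     i=beginIndex+1
--     j=endIndex
--     while True:
--         while nums[i]<val:
--             if i==endIndex:
--                 break
--             i+=1
--         while nums[j]>val:
--             if j==beginIndex:
--                 break
--             j-=1
--         if i>=j:
--             break
--         temp=nums[i]
--         nums[i]=nums[j]
--         nums[j]=temp
--     temp=nums[j]
--     nums[j]=val
--     nums[beginIndex]=temp
--     return j
--
-- def QuickSortsort(nums,beginIndex,endIndex):
--     if beginIndex>=endIndex:
--         return
--     j=QuickSortPartition(nums,beginIndex,endIndex)
--     QuickSortsort(nums,beginIndex,j-1)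
--     QuickSortsort(nums,j+1,endIndex)
-- ===== SOURCE B (Python) =====
-- def IsSeries(nums):
--     # One pass: count zeros (jokers) and track min/max/count of the nonzero
--     # cards; the total gap of the sorted nonzeros is hi - lo - (cnt - 1).
--     # (Unlike A, nums is NOT sorted in place.)
--     zeros = 0
--     cnt = 0
--     lo = 0
--     hi = 0
--     for x in nums:
--         if x == 0:
--             zeros += 1
--         elif cnt == 0:
--             cnt = 1
--             lo = x
--             hi = x
--         else:
--             cnt += 1
--             lo = min(lo, x)
--             hi = max(hi, x)
--     return cnt == 0 or hi - lo - (cnt - 1) <= zeros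
-- ===== Notes on version B (the rewrite author's own statement) =====
-- stated objective: simpler
-- what changed: Replaces in-place quicksort followed by a gap-summing scan with one constant-space pass computing zero count and min/max/count of nonzeros, using that the summed gaps of the sorted nonzeros telescope to max-min-(count-1); Pre_ excludes lists in which some value occurs three or more times, on which A's hand-written quicksort partition loops forever (A never returns there); B also does not mutate nums, while A sorts it in place.
import Mathlib
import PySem

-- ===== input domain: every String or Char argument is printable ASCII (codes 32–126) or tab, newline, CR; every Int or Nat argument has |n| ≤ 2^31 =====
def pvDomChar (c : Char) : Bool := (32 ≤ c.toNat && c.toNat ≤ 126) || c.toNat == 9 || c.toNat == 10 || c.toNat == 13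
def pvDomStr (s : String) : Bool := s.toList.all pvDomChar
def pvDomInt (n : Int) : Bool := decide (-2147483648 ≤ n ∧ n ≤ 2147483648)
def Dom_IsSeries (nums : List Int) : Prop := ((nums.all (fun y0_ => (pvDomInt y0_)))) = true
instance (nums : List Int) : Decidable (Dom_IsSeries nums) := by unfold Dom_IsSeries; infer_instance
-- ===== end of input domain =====

-- B replaces A's in-place quicksort + gap-summing scan by a single min/max/count pass
-- (objective: simpler; note A sorts its argument in place, B does not mutate it —
-- the equivalence proved here is about the return value).


-- ===== PORT A =====
-- nums[i] / nums[i]=v; in A's execution every index is in range, the default only totalizes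
def aGet (xs : List Int) (i : Int) : Int := PySem.List.pyGetD xs i 0
def aSet (xs : List Int) (i : Int) (v : Int) : List Int := PySem.List.pySetD xs i v

-- 'while nums[i]<val: if i==endIndex: break; i+=1'  (fuel totalizes; nums.length is enough)
def findInc (nums : List Int) (val e : Int) : Int → Nat → Int
  | i, 0 => i
  | i, f+1 => if aGet nums i < val then (if i = e then i else findInc nums val e (i+1) f) else i

-- 'while nums[j]>val: if j==beginIndex: break; j-=1'
def findDec (nums : List Int) (val b : Int) : Int → Nat → Int
  | j, 0 => j
  | j, f+1 => if aGet nums j > val then (if j = b then j else findDec nums val b (j-1) f) else j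

-- the 'while True' swap loop of QuickSortPartition (fuel totalizes; it diverges in Python
-- when some value occurs three times, which Pre_ excludes)
def ploop (val b e : Int) : List Int → Int → Int → Nat → List Int × Int
  | nums, _, j, 0 => (nums, j)
  | nums, i, j, f+1 =>
    let i' := findInc nums val e i nums.length
    let j' := findDec nums val b j nums.length
    if i' ≥ j' then (nums, j')
    else ploop val b e (aSet (aSet nums i' (aGet nums j')) j' (aGet nums i')) i' j' f

def partitionA (nums : List Int) (b e : Int) : List Int × Int :=
  let val := aGet nums b
  let p := ploop val b e nums (b+1) e (2*nums.length + 2)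
  let temp := aGet p.1 p.2
  (aSet (aSet p.1 p.2 val) b temp, p.2)

-- QuickSortsort
def qsortA : List Int → Int → Int → Nat → List Int
  | nums, _, _, 0 => nums
  | nums, b, e, f+1 =>
    if b ≥ e then nums
    else
      let p := partitionA nums b e
      qsortA (qsortA p.1 b (p.2-1) f) (p.2+1) e f

-- QuickSort
def quickSortA (nums : List Int) : List Int :=
  if nums.length < 2 then nums else qsortA nums 0 ((nums.length : Int) - 1) nums.length

-- state (queue, lastVal, diff)
def stepA (st : Int × Int × Int) (i : Int) : Int × Int × Int :=
  if i = 0 then (st.1 + 1, st.2.1, st.2.2)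
  else if st.2.1 = 0 then (st.1, i, st.2.2)
  else (st.1, i, st.2.2 + (i - st.2.1 - 1))

def IsSeries (nums : List Int) : Bool :=
  let result := quickSortA nums
  let s := result.foldl stepA (0, 0, 0)
  decide (s.2.2 ≤ s.1)

-- ===== PORT B =====
-- state (zeros, cnt, lo, hi)
def stepB (st : Int × Int × Int × Int) (x : Int) : Int × Int × Int × Int :=
  if x = 0 then (st.1 + 1, st.2)
  else if st.2.1 = 0 then (st.1, 1, x, x)
  else (st.1, st.2.1 + 1, min st.2.2.1 x, max st.2.2.2 x)

def IsSeries_alt (nums : List Int) : Bool :=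
  let st := nums.foldl stepB (0, 0, 0, 0)
  decide (st.2.1 = 0) || decide (st.2.2.2 - st.2.2.1 - (st.2.1 - 1) ≤ st.1)

-- ===== PRECONDITION & SPEC =====
-- Pre_ excludes lists in which some value occurs at least three times: on those the
-- partition's 'while True' loop never makes progress and A's quicksort loops forever
-- (A returns on no such input).
def Pre_IsSeries (nums : List Int) : Prop := ∀ v ∈ nums, nums.count v ≤ 2
instance (nums : List Int) : Decidable (Pre_IsSeries nums) := by unfold Pre_IsSeries; infer_instance

def pvWitness_IsSeries : List Int := [3, 0, 5, 4, 0, 3]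

def Spec_IsSeries (nums : List Int) (out : Bool) : Prop := out = IsSeries_alt nums
instance (nums : List Int) (out : Bool) : Decidable (Spec_IsSeries nums out) := by unfold Spec_IsSeries; infer_instance

-- ===== CLAIM (what is proved, stated in full; the proofs are below) =====
def Claim_equal_IsSeries : Prop := ∀ (nums : List Int), Dom_IsSeries nums → Pre_IsSeries nums → Spec_IsSeries nums (IsSeries nums)

-- ===== LEMMAS AND PROOFS =====

-- ---------- basic facts about aGet / aSet ----------

theorem length_aSet (xs : List Int) (i : Int) (v : Int) : (aSet xs i v).length = xs.length := by
  simp [aSet, PySem.List.length_pySetD]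

theorem aGet_aSet (xs : List Int) (i : Int) (v : Int) (h0 : 0 ≤ i) (h : i < (xs.length : Int))
    (m : Int) (hm0 : 0 ≤ m) : aGet (aSet xs i v) m = if m = i then v else aGet xs m := by
  have hi : i = ((i.toNat : Nat) : Int) := (Int.toNat_of_nonneg h0).symm
  have hm : m = ((m.toNat : Nat) : Int) := (Int.toNat_of_nonneg hm0).symm
  rw [aGet, aSet, hi, hm, PySem.List.pyGetD_pySetD_natCast xs i.toNat m.toNat v 0 (by omega)]
  rw [aGet]
  split_ifs with h1 h2 h2 <;> first | rfl | omega

theorem aGet_eq_getElem (xs : List Int) (i : Int) (h0 : 0 ≤ i) (h : i < (xs.length : Int)) :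
    aGet xs i = xs[i.toNat]'(by omega) := by
  exact PySem.List.pyGetD_eq_getElem xs 0 h0 h

-- count bookkeeping for a single in-range set
theorem count_set_balance (l : List Int) (i : Nat) (a v : Int) (h : i < l.length) :
    (l.set i a).count v + (if l[i] = v then 1 else 0) = l.count v + (if a = v then 1 else 0) := by
  induction l generalizing i with
  | nil => simp at h
  | cons x t ih =>
    cases i with
    | zero => simp [List.count_cons]; split_ifs <;> omega
    | succ n =>
      have := ih n (by simpa using h)
      simp only [List.set_cons_succ, List.count_cons, List.getElem_cons_succ]
      split_ifs at * <;> omega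

-- the two-set swap is a permutation (also when i = j)
theorem swap_perm (l : List Int) (i j : Int) (hi0 : 0 ≤ i) (hi : i < (l.length : Int))
    (hj0 : 0 ≤ j) (hj : j < (l.length : Int)) :
    (aSet (aSet l i (aGet l j)) j (aGet l i)).Perm l := by
  have hset : ∀ (xs : List Int) (p : Int) (v : Int), 0 ≤ p → aSet xs p v = xs.set p.toNat v := by
    intro xs p v hp; rw [aSet, PySem.List.pySetD_of_nonneg xs v hp]
  rw [hset _ _ _ hj0, hset _ _ _ hi0,
      aGet_eq_getElem l j hj0 hj, aGet_eq_getElem l i hi0 hi]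
  apply List.perm_iff_count.mpr
  intro v
  have h1 := count_set_balance l i.toNat (l[j.toNat]'(by omega)) v (by omega)
  have h2 := count_set_balance (l.set i.toNat (l[j.toNat]'(by omega))) j.toNat
      (l[i.toNat]'(by omega)) v (by simp; omega)
  have h3 : (l.set i.toNat (l[j.toNat]'(by omega)))[j.toNat]'(by simp; omega)
      = l[j.toNat]'(by omega) := by
    rw [List.getElem_set]; split <;> rfl
  rw [h3] at h2
  split_ifs at h1 h2 <;> omega

-- three distinct in-range positions holding v force count v ≥ 3
theorem one_le_count_of_getElem (l : List Int) (a : Nat) (v : Int) (ha : a < l.length)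
    (hv : l[a] = v) : 1 ≤ l.count v := by
  have : v ∈ l := hv ▸ l.getElem_mem ha
  exact List.one_le_count_iff.mpr this

theorem three_le_count (l : List Int) (a b c : Nat) (v : Int) (hab : a < b) (hbc : b < c)
    (hc : c < l.length) (hva : l[a]'(by omega) = v) (hvb : l[b]'(by omega) = v)
    (hvc : l[c] = v) : 3 ≤ l.count v := by
  have hsplit : l.count v = (l.take c).count v + (l.drop c).count v := by
    rw [← List.count_append, List.take_append_drop]
  have hdrop : 1 ≤ (l.drop c).count v :=
    one_le_count_of_getElem _ 0 v (by simp; omega) (by simpa using hvc)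
  have hsplit2 : (l.take c).count v = ((l.take c).take b).count v + ((l.take c).drop b).count v := by
    rw [← List.count_append, List.take_append_drop]
  have h1 : 1 ≤ ((l.take c).take b).count v :=
    one_le_count_of_getElem _ a v (by simp; omega)
      (by rw [List.getElem_take, List.getElem_take]; exact hva)
  have h2 : 1 ≤ ((l.take c).drop b).count v :=
    one_le_count_of_getElem _ 0 v (by simp; omega)
      (by simp only [List.getElem_drop, List.getElem_take]; simpa using hvb)
  omega

-- ---------- the two index scans ----------

theorem findInc_spec (nums : List Int) (val e : Int) :
    ∀ (f : Nat) (i : Int), 0 ≤ i → i ≤ e → e - i < (f : Int) →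
      i ≤ findInc nums val e i f ∧ findInc nums val e i f ≤ e ∧
      (∀ k, i ≤ k → k < findInc nums val e i f → aGet nums k < val) ∧
      (findInc nums val e i f = e ∨ val ≤ aGet nums (findInc nums val e i f)) := by
  intro f
  induction f with
  | zero => intro i h0 hie hf; simp at hf; omega
  | succ f ih =>
    intro i h0 hie hf
    rw [findInc]
    by_cases hlt : aGet nums i < val
    · rw [if_pos hlt]
      by_cases hie' : i = e
      · rw [if_pos hie']
        exact ⟨le_refl i, by omega, fun k hk1 hk2 => by omega, Or.inl hie'⟩
      · rw [if_neg hie']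
        obtain ⟨c1, c2, c3, c4⟩ := ih (i + 1) (by omega) (by omega) (by push_cast at hf ⊢; omega)
        refine ⟨by omega, c2, ?_, c4⟩
        intro k hk1 hk2
        by_cases hk : k = i
        · rw [hk]; exact hlt
        · exact c3 k (by omega) hk2
    · rw [if_neg hlt]
      exact ⟨le_refl i, hie, fun k hk1 hk2 => by omega, Or.inr (by omega)⟩

theorem findDec_spec (nums : List Int) (val b : Int) :
    ∀ (f : Nat) (j : Int), j < (nums.length : Int) → b ≤ j → j - b < (f : Int) →
      findDec nums val b j f ≤ j ∧ b ≤ findDec nums val b j f ∧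
      (∀ k, findDec nums val b j f < k → k ≤ j → val < aGet nums k) ∧
      (findDec nums val b j f = b ∨ aGet nums (findDec nums val b j f) ≤ val) := by
  intro f
  induction f with
  | zero => intro j hjl hbj hf; simp at hf; omega
  | succ f ih =>
    intro j hjl hbj hf
    rw [findDec]
    by_cases hgt : aGet nums j > val
    · rw [if_pos hgt]
      by_cases hjb : j = b
      · rw [if_pos hjb]
        exact ⟨le_refl j, by omega, fun k hk1 hk2 => by omega, Or.inl hjb⟩
      · rw [if_neg hjb]
        obtain ⟨c1, c2, c3, c4⟩ := ih (j - 1) (by omega) (by omega) (by push_cast at hf ⊢; omega)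
        refine ⟨by omega, c2, ?_, c4⟩
        intro k hk1 hk2
        by_cases hk : k = j
        · rw [hk]; exact hgt
        · exact c3 k hk1 (by omega)
    · rw [if_neg hgt]
      exact ⟨le_refl j, hbj, fun k hk1 hk2 => by omega, Or.inr (by omega)⟩

-- ---------- the swap loop ----------

theorem ploop_spec (val b e : Int) :
    ∀ (f : Nat) (nums : List Int) (i j : Int),
      0 ≤ b → b < e → e < (nums.length : Int) →
      (∀ v, nums.count v ≤ 2) →
      aGet nums b = val →
      b < i → i ≤ j → j ≤ e →
      (∀ k, b < k → k < i → aGet nums k ≤ val) →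
      (∀ k, j < k → k ≤ e → val ≤ aGet nums k) →
      2 * (j - i) + (if val ≤ aGet nums i ∧ aGet nums j ≤ val then 1 else 0) < (f : Int) →
      (ploop val b e nums i j f).1.Perm nums ∧
      (∀ k, 0 ≤ k → (k ≤ b ∨ e < k) → aGet (ploop val b e nums i j f).1 k = aGet nums k) ∧
      b ≤ (ploop val b e nums i j f).2 ∧ (ploop val b e nums i j f).2 ≤ e ∧
      (∀ k, b < k → k < (ploop val b e nums i j f).2 → aGet (ploop val b e nums i j f).1 k ≤ val) ∧
      ((ploop val b e nums i j f).2 = b ∨ aGet (ploop val b e nums i j f).1 (ploop val b e nums i j f).2 ≤ val) ∧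
      (∀ k, (ploop val b e nums i j f).2 < k → k ≤ e → val ≤ aGet (ploop val b e nums i j f).1 k) ∧
      (∀ k, b ≤ k → k ≤ e → ∃ k', b ≤ k' ∧ k' ≤ e ∧ aGet (ploop val b e nums i j f).1 k = aGet nums k') := by
  intro f
  induction f with
  | zero =>
    intro nums i j hb0 hbe he hc hvb hbi hij hje hleft hright hf
    exfalso; split_ifs at hf <;> simp at hf <;> omega
  | succ f ih =>
    intro nums i j hb0 hbe he hc hvb hbi hij hje hleft hright hf
    have hstep : ploop val b e nums i j (f+1) =
        if findInc nums val e i nums.length ≥ findDec nums val b j nums.length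
        then (nums, findDec nums val b j nums.length)
        else ploop val b e
          (aSet (aSet nums (findInc nums val e i nums.length)
              (aGet nums (findDec nums val b j nums.length)))
            (findDec nums val b j nums.length)
            (aGet nums (findInc nums val e i nums.length)))
          (findInc nums val e i nums.length) (findDec nums val b j nums.length) f := rfl
    set i' := findInc nums val e i nums.length with hi'def
    set j' := findDec nums val b j nums.length with hj'def
    obtain ⟨hIi, hIe, hIscan, hIstop⟩ :=
      findInc_spec nums val e nums.length i (by omega) (by omega) (by omega)
    obtain ⟨hJj, hJb, hJscan, hJstop⟩ :=
      findDec_spec nums val b nums.length j (by omega) (by omega) (by omega)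
    by_cases hx : i' ≥ j'
    · rw [hstep, if_pos hx]
      refine ⟨List.Perm.refl nums, fun k _ _ => rfl, hJb, by omega, ?_, hJstop, ?_, ?_⟩
      · intro k hk1 hk2
        by_cases hk : k < i
        · exact hleft k hk1 hk
        · exact le_of_lt (hIscan k (by omega) (by omega))
      · intro k hk1 hk2
        by_cases hk : k ≤ j
        · exact le_of_lt (hJscan k hk1 hk)
        · exact hright k (by omega) hk2
      · exact fun k hk1 hk2 => ⟨k, hk1, hk2, rfl⟩
    · rw [hstep, if_neg hx]
      have hij' : i' < j' := by omega
      set ns := aSet (aSet nums i' (aGet nums j')) j' (aGet nums i') with hnsdef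
      have hi'0 : 0 ≤ i' := by omega
      have hi'l : i' < (nums.length : Int) := by omega
      have hj'0 : 0 ≤ j' := by omega
      have hj'l : j' < (nums.length : Int) := by omega
      have hlen : ns.length = nums.length := by rw [hnsdef, length_aSet, length_aSet]
      have hperm : ns.Perm nums := swap_perm nums i' j' hi'0 hi'l hj'0 hj'l
      have hget : ∀ m, 0 ≤ m → aGet ns m =
          if m = j' then aGet nums i' else if m = i' then aGet nums j' else aGet nums m := by
        intro m hm
        rw [hnsdef, aGet_aSet _ _ _ hj'0 (by rw [length_aSet]; exact hj'l) m hm]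
        by_cases hmj : m = j'
        · rw [if_pos hmj, if_pos hmj]
        · rw [if_neg hmj, if_neg hmj, aGet_aSet _ _ _ hi'0 hi'l m hm]
      have hIstop' : val ≤ aGet nums i' := by
        rcases hIstop with h | h
        · omega
        · exact h
      have hJstop' : aGet nums j' ≤ val := by
        rcases hJstop with h | h
        · omega
        · exact h
      have hvb' : aGet ns b = val := by
        rw [hget b hb0, if_neg (by omega), if_neg (by omega)]; exact hvb
      have hfuel : 2 * (j' - i') +
          (if val ≤ aGet ns i' ∧ aGet ns j' ≤ val then (1:Int) else 0) < (f : Int) := by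
        have hgi : aGet ns i' = aGet nums j' := by
          rw [hget i' hi'0, if_neg (by omega), if_pos rfl]
        have hgj : aGet ns j' = aGet nums i' := by
          rw [hget j' hj'0, if_pos rfl]
        by_cases hmv : i' = i ∧ j' = j
        · have hχ : (if val ≤ aGet nums i ∧ aGet nums j ≤ val then (1:Int) else 0) = 1 := by
            rw [if_pos ⟨hmv.1 ▸ hIstop', hmv.2 ▸ hJstop'⟩]
          have hχ' : (if val ≤ aGet ns i' ∧ aGet ns j' ≤ val then (1:Int) else 0) = 0 := by
            rw [if_neg]
            rintro ⟨h1, h2⟩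
            rw [hgi] at h1; rw [hgj] at h2
            have e1 : aGet nums j' = val := le_antisymm hJstop' h1
            have e2 : aGet nums i' = val := le_antisymm h2 hIstop'
            have g1 : nums[b.toNat]'(by omega) = val := by
              rw [← aGet_eq_getElem nums b hb0 (by omega)]; exact hvb
            have g2 : nums[i'.toNat]'(by omega) = val := by
              rw [← aGet_eq_getElem nums i' hi'0 hi'l]; exact e2
            have g3 : nums[j'.toNat]'(by omega) = val := by
              rw [← aGet_eq_getElem nums j' hj'0 hj'l]; exact e1
            have := three_le_count nums b.toNat i'.toNat j'.toNat val
              (by omega) (by omega) (by omega) g1 g2 g3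
            have := hc val
            omega
          rw [hχ'] at *
          rw [hχ] at hf
          omega
        · have hmove : i < i' ∨ j' < j := by omega
          have hχ0 : (0:Int) ≤ (if val ≤ aGet nums i ∧ aGet nums j ≤ val then (1:Int) else 0) := by
            split_ifs <;> omega
          have hχ'1 : (if val ≤ aGet ns i' ∧ aGet ns j' ≤ val then (1:Int) else 0) ≤ 1 := by
            split_ifs <;> omega
          omega
      obtain ⟨c1, c2, c3, c4, c5, c6, c7, c8⟩ :=
        ih ns i' j' hb0 hbe (by rw [hlen]; exact he)
          (fun v => (hperm.count_eq v) ▸ hc v) hvb'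
          (by omega) (by omega) (by omega)
          (fun k hk1 hk2 => by
            rw [hget k (by omega), if_neg (by omega), if_neg (by omega)]
            by_cases hk : k < i
            · exact hleft k hk1 hk
            · exact le_of_lt (hIscan k (by omega) (by omega)))
          (fun k hk1 hk2 => by
            rw [hget k (by omega), if_neg (by omega), if_neg (by omega)]
            by_cases hk : k ≤ j
            · exact le_of_lt (hJscan k (by omega) hk)
            · exact hright k (by omega) hk2)
          hfuel
      refine ⟨c1.trans hperm, ?_, c3, c4, c5, c6, c7, ?_⟩
      · intro k hk0 hk
        rw [c2 k hk0 hk, hget k hk0, if_neg (by omega), if_neg (by omega)]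
      · intro k hk1 hk2
        obtain ⟨k', hk'1, hk'2, hk'3⟩ := c8 k hk1 hk2
        by_cases h1 : k' = j'
        · exact ⟨i', by omega, by omega, by
            rw [hk'3, hget k' (by omega), if_pos h1]⟩
        · by_cases h2 : k' = i'
          · exact ⟨j', by omega, by omega, by
              rw [hk'3, hget k' (by omega), if_neg h1, if_pos h2]⟩
          · exact ⟨k', hk'1, hk'2, by
              rw [hk'3, hget k' (by omega), if_neg h1, if_neg h2]⟩

-- ---------- partition ----------

theorem partition_spec (nums : List Int) (b e : Int) (h0 : 0 ≤ b) (hbe : b < e)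
    (he : e < (nums.length : Int)) (hc : ∀ v, nums.count v ≤ 2) :
    (partitionA nums b e).1.Perm nums ∧
    (∀ k, 0 ≤ k → (k < b ∨ e < k) → aGet (partitionA nums b e).1 k = aGet nums k) ∧
    b ≤ (partitionA nums b e).2 ∧ (partitionA nums b e).2 ≤ e ∧
    aGet (partitionA nums b e).1 (partitionA nums b e).2 = aGet nums b ∧
    (∀ k, b ≤ k → k < (partitionA nums b e).2 → aGet (partitionA nums b e).1 k ≤ aGet nums b) ∧
    (∀ k, (partitionA nums b e).2 < k → k ≤ e → aGet nums b ≤ aGet (partitionA nums b e).1 k) ∧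
    (∀ k, b ≤ k → k ≤ e → ∃ k', b ≤ k' ∧ k' ≤ e ∧ aGet (partitionA nums b e).1 k = aGet nums k') := by
  set val := aGet nums b with hvaldef
  set p := ploop val b e nums (b+1) e (2*nums.length + 2) with hpdef
  have hstep : partitionA nums b e = (aSet (aSet p.1 p.2 val) b (aGet p.1 p.2), p.2) := rfl
  obtain ⟨p1, p2, p3, p4, p5, p6, p7, p8⟩ :=
    ploop_spec val b e (2*nums.length + 2) nums (b+1) e h0 hbe he hc rfl
      (by omega) (by omega) (le_refl e)
      (fun k hk1 hk2 => absurd hk2 (by omega))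
      (fun k hk1 hk2 => absurd hk2 (by omega))
      (by split_ifs <;> push_cast <;> omega)
  set ns := p.1 with hnsdef
  set j := p.2 with hjdef
  have hlen : ns.length = nums.length := p1.length_eq
  have hnb : aGet ns b = val := p2 b h0 (Or.inl (le_refl b))
  have hj0 : 0 ≤ j := by omega
  have hjl : j < (ns.length : Int) := by rw [hlen]; omega
  have hbl : b < (ns.length : Int) := by rw [hlen]; omega
  have hget2 : ∀ m, 0 ≤ m →
      aGet (aSet (aSet ns j val) b (aGet ns j)) m =
        if m = b then aGet ns j else if m = j then val else aGet ns m := by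
    intro m hm
    rw [aGet_aSet _ _ _ h0 (by rw [length_aSet]; exact hbl) m hm]
    by_cases hmb : m = b
    · rw [if_pos hmb, if_pos hmb]
    · rw [if_neg hmb, if_neg hmb, aGet_aSet _ _ _ hj0 hjl m hm]
  have hperm2 : (aSet (aSet ns j val) b (aGet ns j)).Perm ns := by
    rw [← hnb]
    exact swap_perm ns j b hj0 hjl h0 hbl
  rw [hstep]
  refine ⟨hperm2.trans p1, ?_, p3, p4, ?_, ?_, ?_, ?_⟩
  · intro k hk0 hk
    rw [hget2 k hk0, if_neg (by omega), if_neg (by omega)]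
    exact p2 k hk0 (by omega)
  · rw [hget2 j hj0]
    by_cases hjb : j = b
    · rw [if_pos hjb, hjb, hnb]
    · rw [if_neg (by omega), if_pos rfl]
  · intro k hk1 hk2
    by_cases hkb : k = b
    · rw [hget2 k (by omega), if_pos hkb]
      rcases p6 with h | h
      · omega
      · exact h
    · rw [hget2 k (by omega), if_neg hkb, if_neg (by omega)]
      exact p5 k (by omega) hk2
  · intro k hk1 hk2
    rw [hget2 k (by omega), if_neg (by omega), if_neg (by omega)]
    exact p7 k hk1 hk2
  · intro k hk1 hk2
    rw [hget2 k (by omega)]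
    by_cases hkb : k = b
    · rw [if_pos hkb]
      exact p8 j (by omega) (by omega)
    · rw [if_neg hkb]
      by_cases hkj : k = j
      · rw [if_pos hkj]
        exact ⟨b, le_refl b, by omega, rfl⟩
      · rw [if_neg hkj]
        exact p8 k hk1 hk2

-- ---------- the recursive sort ----------

theorem qsort_spec : ∀ (f : Nat) (nums : List Int) (b e : Int),
    0 ≤ b → e < (nums.length : Int) → (∀ v, nums.count v ≤ 2) → e - b < (f : Int) →
    (qsortA nums b e f).Perm nums ∧
    (∀ k, 0 ≤ k → (k < b ∨ e < k) → aGet (qsortA nums b e f) k = aGet nums k) ∧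
    (∀ k1 k2, b ≤ k1 → k1 ≤ k2 → k2 ≤ e → aGet (qsortA nums b e f) k1 ≤ aGet (qsortA nums b e f) k2) ∧
    (∀ k, b ≤ k → k ≤ e → ∃ k', b ≤ k' ∧ k' ≤ e ∧ aGet (qsortA nums b e f) k = aGet nums k') := by
  intro f
  induction f with
  | zero =>
    intro nums b e h0 he hc hf
    exact ⟨List.Perm.refl nums, fun k _ _ => rfl,
      fun k1 k2 h1 h2 h3 => absurd h3 (by simp at hf; omega),
      fun k hk1 hk2 => ⟨k, hk1, hk2, rfl⟩⟩
  | succ f ih =>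
    intro nums b e h0 he hc hf
    by_cases hbe : b ≥ e
    · have hstep : qsortA nums b e (f+1) = nums := by rw [qsortA, if_pos hbe]
      rw [hstep]
      refine ⟨List.Perm.refl nums, fun k _ _ => rfl, ?_, fun k hk1 hk2 => ⟨k, hk1, hk2, rfl⟩⟩
      intro k1 k2 h1 h2 h3
      have : k1 = k2 := by omega
      rw [this]
    · have hstep : qsortA nums b e (f+1) =
        qsortA (qsortA (partitionA nums b e).1 b ((partitionA nums b e).2 - 1) f)
          ((partitionA nums b e).2 + 1) e f := by
        rw [qsortA, if_neg hbe]
      obtain ⟨q1, q2, q3, q4, q5, q6, q7, q8⟩ := partition_spec nums b e h0 (by omega) he hc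
      set val := aGet nums b with hvaldef
      set ns := (partitionA nums b e).1 with hnsdef
      set j := (partitionA nums b e).2 with hjdef
      have hlen : ns.length = nums.length := q1.length_eq
      obtain ⟨r1p, r1out, r1sort, r1src⟩ :=
        ih ns b (j-1) h0 (by rw [hlen]; omega) (fun v => (q1.count_eq v) ▸ hc v)
          (by omega)
      set r1 := qsortA ns b (j-1) f with hr1def
      have hlen1 : r1.length = ns.length := r1p.length_eq
      obtain ⟨r2p, r2out, r2sort, r2src⟩ :=
        ih r1 (j+1) e (by omega) (by rw [hlen1, hlen]; exact he)
          (fun v => (r1p.count_eq v) ▸ (q1.count_eq v) ▸ hc v) (by omega)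
      set r2 := qsortA r1 (j+1) e f with hr2def
      have valj : aGet r2 j = val := by
        rw [r2out j (by omega) (by omega), r1out j (by omega) (by omega)]
        exact q5
      have hleftb : ∀ k, b ≤ k → k ≤ j - 1 → aGet r2 k ≤ val := by
        intro k hk1 hk2
        rw [r2out k (by omega) (by omega)]
        obtain ⟨k', hk'1, hk'2, hk'3⟩ := r1src k hk1 hk2
        rw [hk'3]
        exact q6 k' hk'1 (by omega)
      have hrightb : ∀ k, j + 1 ≤ k → k ≤ e → val ≤ aGet r2 k := by
        intro k hk1 hk2
        obtain ⟨k', hk'1, hk'2, hk'3⟩ := r2src k hk1 hk2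
        rw [hk'3, r1out k' (by omega) (by omega)]
        exact q7 k' (by omega) hk'2
      rw [hstep]
      refine ⟨r2p.trans (r1p.trans q1), ?_, ?_, ?_⟩
      · intro k hk0 hk
        rw [r2out k hk0 (by omega), r1out k hk0 (by omega)]
        exact q2 k hk0 hk
      · intro k1 k2 hk1 hk12 hk2
        by_cases hA : k2 < j
        · rw [r2out k1 (by omega) (by omega), r2out k2 (by omega) (by omega)]
          exact r1sort k1 k2 hk1 hk12 (by omega)
        · by_cases hB : j < k1
          · exact r2sort k1 k2 (by omega) hk12 hk2
          · have hl : aGet r2 k1 ≤ val := by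
              by_cases hk1j : k1 = j
              · rw [hk1j, valj]
              · exact hleftb k1 hk1 (by omega)
            have hr : val ≤ aGet r2 k2 := by
              by_cases hk2j : k2 = j
              · rw [hk2j, valj]
              · exact hrightb k2 (by omega) hk2
            omega
      · intro k hk1 hk2
        by_cases hA : k ≤ j - 1
        · obtain ⟨k', hk'1, hk'2, hk'3⟩ := r1src k hk1 hA
          obtain ⟨k'', hk''1, hk''2, hk''3⟩ := q8 k' hk'1 (by omega)
          exact ⟨k'', hk''1, hk''2, by rw [r2out k (by omega) (by omega), hk'3, hk''3]⟩
        · by_cases hB : k = j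
          · exact ⟨b, le_refl b, by omega, by rw [hB, valj]⟩
          · obtain ⟨k', hk'1, hk'2, hk'3⟩ := r2src k (by omega) hk2
            obtain ⟨k'', hk''1, hk''2, hk''3⟩ := q8 k' (by omega) hk'2
            exact ⟨k'', hk''1, hk''2, by
              rw [hk'3, r1out k' (by omega) (by omega), hk''3]⟩

theorem quickSortA_spec (nums : List Int) (hc : ∀ v, nums.count v ≤ 2) :
    (quickSortA nums).Perm nums ∧ (quickSortA nums).Pairwise (· ≤ ·) := by
  by_cases hlt : nums.length < 2
  · have hstep : quickSortA nums = nums := by rw [quickSortA, if_pos hlt]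
    rw [hstep]
    refine ⟨List.Perm.refl nums, ?_⟩
    match nums, hlt with
    | [], _ => exact List.Pairwise.nil
    | [a], _ => simp
  · have hstep : quickSortA nums = qsortA nums 0 ((nums.length : Int) - 1) nums.length := by
      rw [quickSortA, if_neg hlt]
    obtain ⟨c1, c2, c3, c4⟩ :=
      qsort_spec nums.length nums 0 ((nums.length : Int) - 1) (le_refl 0)
        (by omega) hc (by omega)
    rw [hstep]
    refine ⟨c1, ?_⟩
    have hlen : (qsortA nums 0 ((nums.length : Int) - 1) nums.length).length = nums.length :=
      c1.length_eq
    rw [List.pairwise_iff_getElem]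
    intro a b ha hb hab
    have h1 := aGet_eq_getElem (qsortA nums 0 ((nums.length : Int) - 1) nums.length)
      (a : Int) (by omega) (by omega)
    have h2 := aGet_eq_getElem (qsortA nums 0 ((nums.length : Int) - 1) nums.length)
      (b : Int) (by omega) (by omega)
    have h3 := c3 (a : Int) (b : Int) (by omega) (by omega) (by omega)
    rw [h1, h2] at h3
    simpa using h3

-- ---------- characterisation of the two folds ----------

-- the nonzero elements and the number of zeros
def nzf (l : List Int) : List Int := l.filter (fun x => decide (¬ x = 0))
def zc (l : List Int) : Int := (l.countP (fun x => decide (x = 0)) : Int)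

theorem getLastD_mem (t : List Int) (x : Int) : t.getLastD x ∈ x :: t := by
  induction t generalizing x with
  | nil => simp
  | cons y t' ih =>
    rw [List.getLastD_cons]
    exact List.mem_cons_of_mem x (ih y)

theorem concat_getLastD (x a : Int) (t : List Int) : ((x :: t) ++ [a]).getLastD 0 = a := by
  rw [List.getLastD_eq_getLast?, List.getLast?_concat]; rfl

theorem nzf_append_zero (l : List Int) (a : Int) (ha : a = 0) : nzf (l ++ [a]) = nzf l := by
  simp [nzf, List.filter_append, ha]

theorem nzf_append_nonzero (l : List Int) (a : Int) (ha : ¬ a = 0) :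
    nzf (l ++ [a]) = nzf l ++ [a] := by
  simp [nzf, List.filter_append, ha]

theorem zc_append (l : List Int) (a : Int) :
    zc (l ++ [a]) = zc l + (if a = 0 then 1 else 0) := by
  by_cases h : a = 0
  · simp [zc, List.countP_append, h]
  · simp [zc, List.countP_append, h]

theorem nzf_all_nonzero (l : List Int) : ∀ y ∈ nzf l, ¬ y = 0 := by
  intro y hy
  have := List.of_mem_filter hy
  simpa using this

-- A's loop telescopes: diff = lastNonzero - firstNonzero - (#nonzeros - 1), on ANY list
theorem foldA_char (l : List Int) :
    l.foldl stepA (0, 0, 0) =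
      (if nzf l = [] then ((zc l), 0, 0)
       else (zc l, (nzf l).getLastD 0,
             (nzf l).getLastD 0 - (nzf l).headD 0 - (((nzf l).length : Int) - 1))) := by
  induction l using List.reverseRecOn with
  | nil => simp [nzf, zc]
  | append_singleton l a ih =>
    rw [List.foldl_append, List.foldl_cons, List.foldl_nil, ih]
    by_cases ha : a = 0
    · rw [nzf_append_zero l a ha, zc_append l a, if_pos ha]
      split_ifs with h
      · simp [stepA, ha]
      · simp [stepA, ha]
    · rw [nzf_append_nonzero l a ha, zc_append l a, if_neg ha]
      rcases hE : nzf l with _ | ⟨x, tl⟩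
      · simp [stepA, ha]
      · have hL : (x :: tl).getLastD 0 ≠ 0 := by
          have hmem : (x :: tl).getLastD 0 ∈ x :: tl := by
            rw [List.getLastD_cons]; exact getLastD_mem tl x
          exact nzf_all_nonzero l _ (hE ▸ hmem)
        rw [if_neg (by simp), if_neg (by simp)]
        simp only [stepA, if_neg ha]
        rw [if_neg hL, concat_getLastD x a tl]
        refine Prod.ext rfl (Prod.ext rfl ?_)
        simp only [List.cons_append, List.headD_cons, List.length_append, List.length_cons,
          List.length_nil, List.getLastD_cons]
        push_cast
        ring

-- B's loop: zeros / count / running min / running max of the nonzeros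
theorem foldB_char (l : List Int) :
    l.foldl stepB (0, 0, 0, 0) =
      (if nzf l = [] then ((zc l), 0, 0, 0)
       else (zc l, ((nzf l).length : Int),
             (nzf l).tail.foldl min ((nzf l).headD 0),
             (nzf l).tail.foldl max ((nzf l).headD 0))) := by
  induction l using List.reverseRecOn with
  | nil => simp [nzf, zc]
  | append_singleton l a ih =>
    rw [List.foldl_append, List.foldl_cons, List.foldl_nil, ih]
    by_cases ha : a = 0
    · rw [nzf_append_zero l a ha, zc_append l a, if_pos ha]
      split_ifs with h
      · simp [stepB, ha]
      · simp [stepB, ha]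
    · rw [nzf_append_nonzero l a ha, zc_append l a, if_neg ha]
      rcases hE : nzf l with _ | ⟨x, tl⟩
      · simp [stepB, ha]
      · rw [if_neg (by simp), if_neg (by simp)]
        simp only [stepB, if_neg ha]
        rw [if_neg (show ¬ (((x :: tl).length : Nat) : Int) = 0 by simp; omega)]
        refine Prod.ext rfl (Prod.ext ?_ (Prod.ext ?_ ?_))
        · simp
        · simp [List.foldl_append]
        · simp [List.foldl_append]

-- running min / max over a list are permutation invariants
theorem foldl_min_perm (x y : Int) (t s : List Int) (h : (x :: t).Perm (y :: s)) :
    t.foldl min x = s.foldl min y := by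
  have h1 : PySem.List.min? (x :: t) (fun z => z) = some (t.foldl min x) :=
    PySem.List.min?_id_cons x t
  have h2 : PySem.List.min? (y :: s) (fun z => z) = some (s.foldl min y) :=
    PySem.List.min?_id_cons y s
  have m1 := PySem.List.min?_mem h1
  have m2 := PySem.List.min?_mem h2
  have i1 := PySem.List.min?_isMin h1
  have i2 := PySem.List.min?_isMin h2
  exact le_antisymm (i1 _ (h.mem_iff.mpr m2)) (i2 _ (h.mem_iff.mp m1))

theorem foldl_max_perm (x y : Int) (t s : List Int) (h : (x :: t).Perm (y :: s)) :
    t.foldl max x = s.foldl max y := by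
  have h1 : PySem.List.max? (x :: t) (fun z => z) = some (t.foldl max x) :=
    PySem.List.max?_id_cons x t
  have h2 : PySem.List.max? (y :: s) (fun z => z) = some (s.foldl max y) :=
    PySem.List.max?_id_cons y s
  have m1 := PySem.List.max?_mem h1
  have m2 := PySem.List.max?_mem h2
  have i1 := PySem.List.max?_isMax h1
  have i2 := PySem.List.max?_isMax h2
  exact le_antisymm (i2 _ (h.mem_iff.mp m1)) (i1 _ (h.mem_iff.mpr m2))

-- on a sorted nonempty list, head is the running min and last is the running max
theorem sorted_head_eq_foldl_min (x : Int) (t : List Int) (h : (x :: t).Pairwise (· ≤ ·)) :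
    t.foldl min x = x := by
  have hx : ∀ y ∈ t, x ≤ y := (List.pairwise_cons.mp h).1
  have h1 := PySem.List.foldl_min_le t x
  have h2 := PySem.List.foldl_min_mem t x
  rcases h2 with h2 | h2
  · exact h2
  · exact le_antisymm h1.1 (hx _ h2)

theorem sorted_getLast_eq_foldl_max (x : Int) (t : List Int) (h : (x :: t).Pairwise (· ≤ ·)) :
    t.foldl max x = (x :: t).getLastD 0 := by
  induction t generalizing x with
  | nil => simp
  | cons y t' ih =>
    have hxy : x ≤ y := (List.pairwise_cons.mp h).1 y (by simp)
    have h' : (y :: t').Pairwise (· ≤ ·) := (List.pairwise_cons.mp h).2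
    calc (y :: t').foldl max x = t'.foldl max (max x y) := by simp
    _ = t'.foldl max y := by rw [max_eq_right hxy]
    _ = (y :: t').getLastD 0 := ih y h'
    _ = (x :: y :: t').getLastD 0 := by simp


-- ===== VERDICT (by name: the statement is the Claim_ definition above) =====
theorem IsSeries_spec : Claim_equal_IsSeries := by
  intro nums _ hpre
  unfold Spec_IsSeries
  have hc : ∀ v, nums.count v ≤ 2 := by
    intro v
    by_cases hv : v ∈ nums
    · exact hpre v hv
    · simp [List.count_eq_zero_of_not_mem hv]
  obtain ⟨hperm, hsort⟩ := quickSortA_spec nums hc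
  simp only [IsSeries, IsSeries_alt]
  rw [foldA_char (quickSortA nums), foldB_char nums]
  have hzc : zc (quickSortA nums) = zc nums := by
    rw [zc, zc, hperm.countP_eq]
  have hnz : (nzf (quickSortA nums)).Perm (nzf nums) := hperm.filter _
  by_cases hnil : nzf nums = []
  · have hnil' : nzf (quickSortA nums) = [] := List.Perm.eq_nil (hnil ▸ hnz)
    rw [hnil, hnil', if_pos rfl, if_pos rfl]
    simp [zc]
  · have hnil' : nzf (quickSortA nums) ≠ [] := fun h => hnil (List.Perm.eq_nil (h ▸ hnz.symm))
    rcases hE : nzf (quickSortA nums) with _ | ⟨y, s⟩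
    · exact absurd hE hnil'
    rcases hF : nzf nums with _ | ⟨x, tl⟩
    · exact absurd hF hnil
    rw [hE, hF] at hnz
    have hsnz : (y :: s).Pairwise (· ≤ ·) := hE ▸ hsort.filter _
    have hmin : s.foldl min y = tl.foldl min x := foldl_min_perm y x s tl hnz
    have hmax : s.foldl max y = tl.foldl max x := foldl_max_perm y x s tl hnz
    have hhead : s.foldl min y = y := sorted_head_eq_foldl_min y s hsnz
    have hlast : s.foldl max y = (y :: s).getLastD 0 := sorted_getLast_eq_foldl_max y s hsnz
    have hlist : (y :: s).length = (x :: tl).length := hnz.length_eq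
    rw [if_neg (show ¬ ((y :: s : List Int) = []) by simp),
        if_neg (show ¬ ((x :: tl : List Int) = []) by simp)]
    have h1 : (y :: s).getLastD 0 = tl.foldl max x := hlast.symm.trans hmax
    have h2 : y = tl.foldl min x := hhead.symm.trans hmin
    have h3 : (((y :: s).length : Nat) : Int) = (((x :: tl).length : Nat) : Int) := by
      rw [hlist]
    simp only [List.headD_cons, List.tail_cons, h1, h3, hzc]
    simp only [h2]
    simp
    all_goals omega
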